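-- pv_equiv track=rewrite | github.com/xvk3/nasmshell | nasmshell.py | parse_disassembly
-- ===== SOURCE A (Python) =====
-- def parse_disassembly(disas):
--     cur_opcodes = ''
--     cur_disas = ''
--     s = ''
--     for line in disas.splitlines():
--         line = line.strip()
--         if len(line) > 0:
--             # break out the elements of the line
--             elems = line.split(None, 2)
--             if len(elems) == 3:
--                 # starts a new instruction, append previous and clear our state
--                 if len(cur_opcodes) > 0:
--                     s += "%-24s %s\n" % (cur_opcodes, cur_disas)
--                 cur_opcodes = ''
--                 # offset, opcodes, disas-text
--                 cur_disas = elems[2]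
--                 cur_opcodes = elems[1]
--             elif len(elems) == 1 and elems[0][0] == '-':
--                 # continuation
--                 cur_opcodes += elems[0][1:]
--     # append last instruction
--     if len(cur_opcodes) > 0:
--         s += "%-24s %s" % (cur_opcodes, cur_disas)
--     return s
-- ===== SOURCE B (Python) =====
-- def parse_disassembly(disas):
--     # Scan the lines back-to-front: continuation suffixes are collected in
--     # `pending` and attached to the start line that precedes them; records are
--     # gathered in reverse and flipped once at the end.
--     pending = ''
--     records = []
--     for line in reversed(disas.splitlines()):
--         elems = line.strip().split(None, 2)
--         if len(elems) == 3:
--             records.append((elems[1] + pending, elems[2]))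
--             pending = ''
--         elif len(elems) == 1 and elems[0].startswith('-'):
--             pending = elems[0][1:] + pending
--     if pending:
--         records.append((pending, ''))
--     records.reverse()
--     return '\n'.join('%-24s %s' % r for r in records)
-- ===== Notes on version B (the rewrite author's own statement) =====
-- stated objective: alternative
-- what changed: Replaces A's forward scan that interleaves string accumulation with flush-on-next-start state by a backward scan that attaches continuation suffixes to the start line preceding them, collects (opcodes, disas) records, and renders them with a single join.
import Mathlib
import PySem

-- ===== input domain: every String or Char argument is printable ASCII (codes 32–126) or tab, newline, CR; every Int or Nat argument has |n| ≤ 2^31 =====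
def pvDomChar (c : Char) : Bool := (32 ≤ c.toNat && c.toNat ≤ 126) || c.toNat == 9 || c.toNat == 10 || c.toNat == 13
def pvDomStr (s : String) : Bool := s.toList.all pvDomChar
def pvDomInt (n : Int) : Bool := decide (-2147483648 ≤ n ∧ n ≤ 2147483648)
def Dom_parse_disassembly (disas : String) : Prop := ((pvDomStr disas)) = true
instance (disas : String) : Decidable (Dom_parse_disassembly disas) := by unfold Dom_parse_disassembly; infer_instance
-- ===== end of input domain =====

-- B re-reads A's merge backwards: continuation suffixes are gathered while scanning the
-- lines in reverse and attached to the start line that precedes them, giving a record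
-- list rendered by one join; same cost, different decomposition ("alternative").

-- ===== PORT A =====
-- "%-24s %s" % (op, dis): hand port (exact) — left-justify op to width 24, a space, then dis
def pvFmt (op dis : List Char) : List Char :=
  (op ++ List.replicate (24 - op.length) ' ') ++ ' ' :: dis

-- one iteration of A's for-loop; state = (cur_opcodes, cur_disas, s)
def pvStepA (st : List Char × List Char × List Char) (line0 : List Char) :
    List Char × List Char × List Char :=
  let line := PySem.Chars.strip line0
  if line.length > 0 then
    let elems := PySem.Chars.split₀Max line 2
    if elems.length = 3 then
      let s' := if st.1.length > 0 then st.2.2 ++ pvFmt st.1 st.2.1 ++ ['\n'] else st.2.2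
      ((PySem.List.pyGet? elems 1).getD [], (PySem.List.pyGet? elems 2).getD [], s')
    else if elems.length = 1 ∧
        PySem.List.pyGet? ((PySem.List.pyGet? elems 0).getD []) 0 = some '-' then
      (st.1 ++ PySem.List.slice ((PySem.List.pyGet? elems 0).getD []) (some 1) none,
       st.2.1, st.2.2)
    else st
  else st

def parse_disassembly (disas : String) : String :=
  let fin := (PySem.Chars.splitlines disas.toList).foldl pvStepA ([], [], [])
  String.mk (if fin.1.length > 0 then fin.2.2 ++ pvFmt fin.1 fin.2.1 else fin.2.2)

-- ===== PORT B =====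
-- one iteration of B's loop over the reversed lines; state = (pending, records-so-far)
def pvStepB (st : List Char × List (List Char × List Char)) (line : List Char) :
    List Char × List (List Char × List Char) :=
  let elems := PySem.Chars.split₀Max (PySem.Chars.strip line) 2
  if elems.length = 3 then
    ([], st.2 ++ [((PySem.List.pyGet? elems 1).getD [] ++ st.1,
                   (PySem.List.pyGet? elems 2).getD [])])
  else if elems.length = 1 ∧
      PySem.Chars.startswith ((PySem.List.pyGet? elems 0).getD []) ['-'] then
    (PySem.List.slice ((PySem.List.pyGet? elems 0).getD []) (some 1) none ++ st.1, st.2)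
  else st

def parse_disassembly_alt (disas : String) : String :=
  let r := ((PySem.Chars.splitlines disas.toList).reverse).foldl pvStepB ([], [])
  let recs := (if r.1 ≠ [] then r.2 ++ [(r.1, ([] : List Char))] else r.2).reverse
  String.mk (PySem.Chars.join ['\n'] (recs.map (fun p => pvFmt p.1 p.2)))

-- ===== PRECONDITION & SPEC =====
def Spec_parse_disassembly (disas : String) (out : String) : Prop := out = parse_disassembly_alt disas
instance (disas : String) (out : String) : Decidable (Spec_parse_disassembly disas out) := by unfold Spec_parse_disassembly; infer_instance

-- ===== CLAIM (what is proved, stated in full; the proofs are below) =====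
def Claim_equal_parse_disassembly : Prop := ∀ (disas : String), Dom_parse_disassembly disas → Spec_parse_disassembly disas (parse_disassembly disas)

-- ===== LEMMAS AND PROOFS =====

-- token abstraction of a line: a new-instruction line, a continuation line, or ignored
inductive PvTok where
  | start : List Char → List Char → PvTok
  | cont : List Char → PvTok
  | skip : PvTok

def pvClassify (line : List Char) : PvTok :=
  let elems := PySem.Chars.split₀Max (PySem.Chars.strip line) 2
  if elems.length = 3 then
    .start ((PySem.List.pyGet? elems 1).getD []) ((PySem.List.pyGet? elems 2).getD [])
  else if elems.length = 1 ∧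
      PySem.List.pyGet? ((PySem.List.pyGet? elems 0).getD []) 0 = some '-' then
    .cont (PySem.List.slice ((PySem.List.pyGet? elems 0).getD []) (some 1) none)
  else .skip

def pvTokA (st : List Char × List Char × List Char) : PvTok → List Char × List Char × List Char
  | .start o d => (o, d, if st.1.length > 0 then st.2.2 ++ pvFmt st.1 st.2.1 ++ ['\n'] else st.2.2)
  | .cont c => (st.1 ++ c, st.2.1, st.2.2)
  | .skip => st

def pvTokB (st : List Char × List (List Char × List Char)) :
    PvTok → List Char × List (List Char × List Char)
  | .start o d => ([], st.2 ++ [(o ++ st.1, d)])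
  | .cont c => (c ++ st.1, st.2)
  | .skip => st

-- right-to-left record collector (prepend form), with initial pending p
def pvGoB : List PvTok → List Char → List Char × List (List Char × List Char)
  | [], p => (p, [])
  | t :: ts, p =>
    let r := pvGoB ts p
    match t with
    | .start o d => ([], (o ++ r.1, d) :: r.2)
    | .cont c => (c ++ r.1, r.2)
    | .skip => r

def pvJoin (recs : List (List Char × List Char)) : List Char :=
  PySem.Chars.join ['\n'] (recs.map (fun p => pvFmt p.1 p.2))

theorem pv_dropWhile_head (p : Char → Bool) (l : List Char) (c : Char) (cs : List Char)
    (h : List.dropWhile p l = c :: cs) : p c = false := by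
  have h1 : List.dropWhile p l ≠ [] := by simp [h]
  have := List.head_dropWhile_not (l := l) (p := p) h1
  simpa [h] using this

-- every field produced by split(None, maxsplit) is a nonempty string
theorem pv_go_fields_ne (fuel : ℕ) : ∀ (m : ℕ) (l : List Char) (acc : List (List Char)),
    (∀ e ∈ acc, e ≠ []) → ∀ e ∈ PySem.Chars.split₀Max.go fuel m l acc, e ≠ [] := by
  induction fuel with
  | zero =>
    intro m l acc hacc e he
    rw [PySem.Chars.split₀Max.go] at he
    simp at he
    exact hacc e he
  | succ fuel ih =>
    intro m l acc hacc e he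
    rw [PySem.Chars.split₀Max.go] at he
    rcases hd : List.dropWhile PySem.Chars.isspace l with _ | ⟨c, cs⟩
    · rw [hd] at he; simp at he; exact hacc e he
    · rw [hd] at he
      have hc : PySem.Chars.isspace c = false := pv_dropWhile_head _ _ _ _ hd
      by_cases hm : m = 0
      · simp [hm] at he
        rcases he with he | he
        · exact hacc e he
        · simp [he]
      · simp [hm] at he
        refine ih (m - 1) _ _ ?_ e he
        intro e' he'
        rcases List.mem_cons.mp he' with he' | he'
        · subst he'; simp [hc]
        · exact hacc e' he'

theorem pv_split_fields_ne (s : List Char) : ∀ e ∈ PySem.Chars.split₀Max s 2, e ≠ [] := by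
  intro e he
  rw [PySem.Chars.split₀Max] at he
  simp only [show ¬((2:Int) < 0) by norm_num, if_false] at he
  exact pv_go_fields_ne _ _ _ _ (by simp) e he

theorem pv_split_nil : PySem.Chars.split₀Max ([] : List Char) 2 = [] := by decide

theorem pv_stepA_eq (st : List Char × List Char × List Char) (line : List Char) :
    pvStepA st line = pvTokA st (pvClassify line) := by
  obtain ⟨op, dis, s⟩ := st
  by_cases h0 : PySem.Chars.strip line = []
  · simp [pvStepA, pvClassify, h0, pv_split_nil, pvTokA]
  · have hlen : (PySem.Chars.strip line).length > 0 := List.length_pos_of_ne_nil h0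
    simp only [pvStepA, pvClassify, hlen, if_pos]
    split_ifs with h1 h2 <;> simp [pvTokA] <;> simp_all [List.length_pos_iff]

theorem pv_stepB_eq (st : List Char × List (List Char × List Char)) (line : List Char) :
    pvStepB st line = pvTokB st (pvClassify line) := by
  obtain ⟨p, recs⟩ := st
  simp only [pvStepB, pvClassify]
  generalize helems : PySem.Chars.split₀Max (PySem.Chars.strip line) 2 = elems
  by_cases h1 : elems.length = 3
  · simp [h1, pvTokB]
  · simp only [h1, if_false]
    by_cases h2 : elems.length = 1
    · obtain ⟨e0, rfl⟩ : ∃ e0, elems = [e0] := by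
        cases elems with
        | nil => simp at h2
        | cons a t => cases t with
          | nil => exact ⟨a, rfl⟩
          | cons b u => simp at h2
      have hne : e0 ≠ [] := pv_split_fields_ne _ e0 (by rw [helems]; simp)
      obtain ⟨c, cs, rfl⟩ : ∃ c cs, e0 = c :: cs := by
        cases e0 with
        | nil => exact absurd rfl hne
        | cons c cs => exact ⟨c, cs, rfl⟩
      by_cases hc : c = '-'
      · simp [pvTokB, hc, PySem.List.pyGet?, PySem.List.pyIdx?, PySem.Chars.startswith,
          List.isPrefixOf]
      · simp [pvTokB, hc, PySem.List.pyGet?, PySem.List.pyIdx?, PySem.Chars.startswith,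
          List.isPrefixOf, Ne.symm hc]
    · simp [h2, pvTokB]

theorem pv_foldA (ls : List (List Char)) : ∀ st,
    ls.foldl pvStepA st = (ls.map pvClassify).foldl pvTokA st := by
  induction ls with
  | nil => intro st; rfl
  | cons a t ih => intro st; simp only [List.foldl_cons, List.map_cons, pv_stepA_eq, ih]

theorem pv_foldB (ls : List (List Char)) : ∀ st,
    ls.foldl pvStepB st = (ls.map pvClassify).foldl pvTokB st := by
  induction ls with
  | nil => intro st; rfl
  | cons a t ih => intro st; simp only [List.foldl_cons, List.map_cons, pv_stepB_eq, ih]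

-- A's s-component is prefix-additive
theorem pv_prefix (ts : List PvTok) : ∀ (op dis s : List Char),
    ts.foldl pvTokA (op, dis, s) =
      ((ts.foldl pvTokA (op, dis, [])).1, (ts.foldl pvTokA (op, dis, [])).2.1,
        s ++ (ts.foldl pvTokA (op, dis, [])).2.2) := by
  induction ts with
  | nil => intro op dis s; simp
  | cons t ts ih =>
    intro op dis s
    cases t with
    | start o d =>
      by_cases h : op.length > 0
      · simp only [List.foldl_cons, pvTokA, h, if_pos]
        rw [ih o d (s ++ pvFmt op dis ++ ['\n']), ih o d ([] ++ pvFmt op dis ++ ['\n'])]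
        simp [List.append_assoc]
      · simp only [List.foldl_cons, pvTokA, h, ite_false]
        exact ih o d s
    | cont c => simpa using ih (op ++ c) dis s
    | skip => simpa using ih op dis s

-- B's foldl over the reversed token list computes pvGoB (records reversed, appended)
theorem pv_foldB_goB (ts : List PvTok) : ∀ (p : List Char) (recs : List (List Char × List Char)),
    (ts.reverse).foldl pvTokB (p, recs) = ((pvGoB ts p).1, recs ++ (pvGoB ts p).2.reverse) := by
  induction ts with
  | nil => intro p recs; simp [pvGoB]
  | cons t ts ih =>
    intro p recs
    rw [List.reverse_cons, List.foldl_append, ih p recs]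
    cases t with
    | start o d => simp [pvTokB, pvGoB]
    | cont c => simp [pvTokB, pvGoB]
    | skip => simp [pvTokB, pvGoB]

-- A's output, from state (op, dis) with empty accumulator
def pvOutA (ts : List PvTok) (op dis : List Char) : List Char :=
  let f := ts.foldl pvTokA (op, dis, [])
  if f.1.length > 0 then f.2.2 ++ pvFmt f.1 f.2.1 else f.2.2

theorem pv_join_cons (r : List Char × List Char) (r2 : List Char × List Char)
    (rs : List (List Char × List Char)) :
    pvJoin (r :: r2 :: rs) = pvFmt r.1 r.2 ++ '\n' :: pvJoin (r2 :: rs) := by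
  simp [pvJoin, PySem.Chars.join_cons_cons]

theorem pv_main (ts : List PvTok) (hne : ∀ o d, PvTok.start o d ∈ ts → o ≠ []) :
    ∀ (op dis : List Char),
      pvOutA ts op dis =
        pvJoin (if (op ++ (pvGoB ts []).1).length > 0 then
                  (op ++ (pvGoB ts []).1, dis) :: (pvGoB ts []).2
                else (pvGoB ts []).2) := by
  induction ts with
  | nil =>
    intro op dis
    by_cases h : op.length > 0 <;> simp [pvOutA, pvGoB, pvJoin, h, PySem.Chars.join_singleton,
      PySem.Chars.join_nil]
  | cons t ts ih =>
    have hne' : ∀ o d, PvTok.start o d ∈ ts → o ≠ [] := fun o d hm => hne o d (List.mem_cons_of_mem _ hm)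
    intro op dis
    cases t with
    | skip =>
      simpa [pvOutA, pvGoB] using ih hne' op dis
    | cont c =>
      have := ih hne' (op ++ c) dis
      simp only [pvOutA, List.foldl_cons, pvTokA] at this ⊢
      rw [this]
      simp [pvGoB, List.append_assoc]
    | start o d =>
      have ho : o ≠ [] := hne o d (List.mem_cons_self ..)
      have hrec := ih hne' o d
      -- peel the flush of the previous record out of the fold
      have hout : pvOutA (PvTok.start o d :: ts) op dis =
          (if op.length > 0 then pvFmt op dis ++ ['\n'] else []) ++ pvOutA ts o d := by
        simp only [pvOutA, List.foldl_cons, pvTokA]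
        by_cases h : op.length > 0
        · rw [pv_prefix ts o d]
          by_cases hf : (ts.foldl pvTokA (o, d, [])).1.length > 0 <;>
            simp [h, hf, List.append_assoc]
        · rw [pv_prefix ts o d]
          by_cases hf : (ts.foldl pvTokA (o, d, [])).1.length > 0 <;>
            simp [h, hf]
      rw [hout, hrec]
      have hop1 : (o ++ (pvGoB ts []).1).length > 0 := by
        cases o with
        | nil => exact absurd rfl ho
        | cons a b => simp
      simp only [hop1, if_pos]
      simp only [pvGoB]
      by_cases h : op.length > 0
      · have hop : op ++ ([] : List Char) = op := by simp
        simp only [h, if_pos, hop]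
        rw [pv_join_cons (op, dis) (o ++ (pvGoB ts []).1, d) (pvGoB ts []).2]
        simp [List.append_assoc]
      · have : op = [] := by
          cases op with
          | nil => rfl
          | cons a b => simp at h
        subst this
        simp

-- a start token's opcodes field is a split(None, 2) field, hence nonempty
theorem pv_classify_start_ne (line o d : List Char) (h : pvClassify line = .start o d) :
    o ≠ [] := by
  rw [pvClassify] at h
  generalize helems : PySem.Chars.split₀Max (PySem.Chars.strip line) 2 = elems at h
  split_ifs at h with h1 h2
  · obtain ⟨a, b, c, rfl⟩ : ∃ a b c, elems = [a, b, c] := by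
      rcases elems with _ | ⟨a, _ | ⟨b, _ | ⟨c, _ | ⟨x, t⟩⟩⟩⟩ <;> simp_all
    have hb : b ≠ [] := pv_split_fields_ne _ b (by rw [helems]; simp)
    simp [PySem.List.pyGet?, PySem.List.pyIdx?] at h
    obtain ⟨rfl, -⟩ := h
    exact hb

-- assemble both ports
theorem pv_ports_eq (disas : String) : parse_disassembly disas = parse_disassembly_alt disas := by
  simp only [parse_disassembly, parse_disassembly_alt]
  rw [pv_foldA, pv_foldB]
  have hmr : List.map pvClassify (PySem.Chars.splitlines disas.toList).reverse
      = ((PySem.Chars.splitlines disas.toList).map pvClassify).reverse := by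
    rw [List.map_reverse]
  rw [hmr]
  have hne : ∀ o d, PvTok.start o d ∈ (PySem.Chars.splitlines disas.toList).map pvClassify → o ≠ [] := by
    intro o d hm
    obtain ⟨line, -, hcl⟩ := List.mem_map.mp hm
    exact pv_classify_start_ne line o d hcl
  have hmain := pv_main ((PySem.Chars.splitlines disas.toList).map pvClassify) hne [] []
  rw [pv_foldB_goB ((PySem.Chars.splitlines disas.toList).map pvClassify) [] []]
  simp only [pvOutA] at hmain
  rw [hmain]
  simp only [List.nil_append]
  by_cases hp : (pvGoB ((PySem.Chars.splitlines disas.toList).map pvClassify) []).1 = []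
  · rw [hp]
    simp [pvJoin]
  · have hl : (pvGoB ((PySem.Chars.splitlines disas.toList).map pvClassify) []).1.length > 0 :=
      List.length_pos_of_ne_nil hp
    simp only [hp, hl, if_pos, ne_eq, not_false_iff, List.reverse_append,
      List.reverse_reverse, List.reverse_cons, List.reverse_nil, List.nil_append,
      List.singleton_append]
    rfl

-- ===== VERDICT (by name: the statement is the Claim_ definition above) =====
theorem parse_disassembly_spec : Claim_equal_parse_disassembly := by
  intro disas _
  unfold Spec_parse_disassembly
  exact pv_ports_eq disas
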